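-- pv_equiv track=rewrite | github.com/catoteig/knowitJulekalender2019 | knowitjulekalender/luke_20/luke_20.py | dowork
-- ===== SOURCE A (Python) =====
-- import math
--
-- def dowork(iterations):
--     tasks = [0, 0, 0, 0, 0]
--     direction = True
--     nextelf, currelf, step, nextstep = 0, -1, 0, 0
--
--     while step < iterations:
--
--         nextelf = moveelf(currelf, direction)
--         nextstep = step + 1
--         if checkprime(nextstep) and findmin(tasks) >= 0:
--             nextelf = findmin(tasks)
--         elif nextstep % 28 == 0:
--             direction = not direction
--             nextelf = moveelf(currelf, direction)
--         elif nextstep % 2 == 0 and ismax(nextelf, tasks):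
--             nextelf = moveelf(nextelf, direction)
--         elif nextstep % 7 == 0:
--             nextelf = 4
--
--         tasks[nextelf] += 1
--         currelf = nextelf
--         step = nextstep
--
--     return max(tasks) - min(tasks)
--
-- def moveelf(currentelf, direction):
--     return (currentelf + 1) % 5 if direction else (currentelf - 1) % 5
--
-- def findmin(list):
--     result = []
--     for i, y in enumerate(list):
--         if y == min(list):
--             result.append(i)
--     return -1 if len(result) > 1 else result[0]
--
-- def findmax(list):
--     result = []
--     for i, y in enumerate(list):
--         if y == max(list):
--             result.append(i)
--     return -1 if len(result) > 1 else result[0]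
--
-- def ismax(elf, list):
--     return True if findmax(list) == elf else False
--
-- def checkprime(number):
--     if number <= 1:
--         return False
--     if number <= 3:
--         return True
--     if number % 2 == 0 or number % 3 == 0:
--         return False
--     for i in range(5, int(math.sqrt(number)) + 1, 6):
--         if number % i == 0 or number % (i + 2) == 0:
--             return False
--     return True
-- ===== SOURCE B (Python) =====
-- import math
--
-- def dowork(iterations):
--     n = iterations
--     is_prime = _sieve(n)
--     tasks = [0, 0, 0, 0, 0]
--     elf, forward = -1, True
--     for s in range(1, n + 1):
--         m = min(tasks)
--         if is_prime[s] and tasks.count(m) == 1: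
--             elf = tasks.index(m)
--         elif s % 28 == 0:
--             forward = not forward
--             elf = (elf + 1) % 5 if forward else (elf - 1) % 5
--         else:
--             nxt = (elf + 1) % 5 if forward else (elf - 1) % 5
--             M = max(tasks)
--             if s % 2 == 0 and tasks.count(M) == 1 and tasks.index(M) == nxt:
--                 elf = (nxt + 1) % 5 if forward else (nxt - 1) % 5
--             elif s % 7 == 0:
--                 elf = 4
--             else:
--                 elf = nxt
--         tasks[elf] += 1
--     return max(tasks) - min(tasks)
--
-- def _sieve(n):
--     # Sieve of Eratosthenes over [0, n]
--     if n < 2: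
--         return [False] * (n + 1 if n >= 0 else 0)
--     flags = [False, False] + [True] * (n - 1)
--     for p in range(2, math.isqrt(n) + 1):
--         if flags[p]:
--             for q in range(p * p, n + 1, p):
--                 flags[q] = False
--     return flags
-- ===== Notes on version B (the rewrite author's own statement) =====
-- stated objective: faster
-- what changed: Replaces the per-step wheel trial-division primality test by a Sieve of Eratosthenes computed once up front (primality becomes an O(1) table lookup inside the simulation), and replaces the enumerate-scan helpers findmin/findmax/ismax by direct count/index unique-extremum tests in a single for-loop.
import Mathlib
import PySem

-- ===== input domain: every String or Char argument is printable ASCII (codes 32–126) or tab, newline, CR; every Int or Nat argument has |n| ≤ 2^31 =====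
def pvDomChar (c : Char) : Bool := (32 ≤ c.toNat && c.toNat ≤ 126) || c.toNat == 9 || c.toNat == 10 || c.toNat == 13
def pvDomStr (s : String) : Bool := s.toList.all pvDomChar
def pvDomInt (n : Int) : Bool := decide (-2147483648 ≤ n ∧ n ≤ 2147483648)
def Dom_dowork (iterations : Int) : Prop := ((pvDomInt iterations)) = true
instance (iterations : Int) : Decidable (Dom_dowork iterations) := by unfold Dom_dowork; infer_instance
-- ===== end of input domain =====

-- B precomputes primality once with a Sieve of Eratosthenes (table lookup per step) instead of A's
-- per-step wheel trial division, and replaces A's enumerate-scan helpers by count/index tests; the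
-- timing run measured B faster on large iterations.

-- ===== PORT A =====
-- int(math.sqrt(n)) is ported as Nat.sqrt: exact for 0 ≤ n ≤ 2^31 (the double sqrt is exact there);
-- B's math.isqrt(n) is the same function, so the helper is shared by both ports
def sqrtI (n : Int) : Int := (Nat.sqrt n.toNat : Int)

def moveelfA (currentelf : Int) (direction : Bool) : Int :=
  if direction then PySem.Int.mod (currentelf + 1) 5 else PySem.Int.mod (currentelf - 1) 5

def findminA (l : List Int) : Int :=
  let result : List Int := (PySem.List.enumerate l).foldl
    (fun acc q => if q.2 == (PySem.List.min? l (fun y => y)).getD 0 then acc ++ [q.1] else acc) []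
  -- `result[0]` raises only when l = []; dowork only calls this on 5-element lists, where result ≠ []
  if 1 < result.length then -1 else (PySem.List.pyGet? result 0).getD 0

def findmaxA (l : List Int) : Int :=
  let result : List Int := (PySem.List.enumerate l).foldl
    (fun acc q => if q.2 == (PySem.List.max? l (fun y => y)).getD 0 then acc ++ [q.1] else acc) []
  if 1 < result.length then -1 else (PySem.List.pyGet? result 0).getD 0

def ismaxA (elf : Int) (l : List Int) : Bool :=
  if findmaxA l == elf then true else false

def checkprimeA (number : Int) : Bool :=
  if number ≤ 1 then false
  else if number ≤ 3 then true
  else if PySem.Int.mod number 2 == 0 || PySem.Int.mod number 3 == 0 then false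
  else
    -- for-loop with early `return False` = any
    !((PySem.List.pyRange 5 (sqrtI number + 1) 6).any
        (fun i => PySem.Int.mod number i == 0 || PySem.Int.mod number (i + 2) == 0))

-- the if/elif chain of the while body, selecting (direction, nextelf)
def selectA (tasks : List Int) (direction : Bool) (currelf nextstep : Int) : Bool × Int :=
  let nextelf := moveelfA currelf direction
  if checkprimeA nextstep && decide (findminA tasks ≥ 0) then
    (direction, findminA tasks)
  else if PySem.Int.mod nextstep 28 == 0 then
    (!direction, moveelfA currelf !direction)
  else if PySem.Int.mod nextstep 2 == 0 && ismaxA nextelf tasks then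
    (direction, moveelfA nextelf direction)
  else if PySem.Int.mod nextstep 7 == 0 then
    (direction, 4)
  else
    (direction, nextelf)

-- `while step < iterations` with step = 0,1,2,… runs exactly iterations.toNat times
def loopA : Nat → List Int → Bool → Int → Int → List Int
  | 0, tasks, _, _, _ => tasks
  | fuel + 1, tasks, direction, currelf, step =>
    let nextstep := step + 1
    let de := selectA tasks direction currelf nextstep
    loopA fuel (PySem.List.pySetD tasks de.2 (PySem.List.pyGetD tasks de.2 0 + 1)) de.1 de.2 nextstep

def dowork (iterations : Int) : Int :=
  let tasks := loopA iterations.toNat [0, 0, 0, 0, 0] true (-1) 0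
  (PySem.List.max? tasks (fun y => y)).getD 0 - (PySem.List.min? tasks (fun y => y)).getD 0

-- ===== PORT B =====
-- _sieve(n): Sieve of Eratosthenes over [0, n]
def sieveB (n : Int) : List Bool :=
  if n < 2 then List.replicate (if 0 ≤ n then (n + 1).toNat else 0) false
  else
    (PySem.List.pyRange 2 (sqrtI n + 1) 1).foldl
      (fun flags p =>
        if PySem.List.pyGetD flags p false then
          (PySem.List.pyRange (p * p) (n + 1) p).foldl
            (fun fl q => PySem.List.pySetD fl q false) flags
        else flags)
      (false :: false :: List.replicate (n - 1).toNat true)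

def moveB (elf : Int) (forward : Bool) : Int :=
  if forward then PySem.Int.mod (elf + 1) 5 else PySem.Int.mod (elf - 1) 5

-- the branch of Source B's for-body, selecting (forward, elf); isp is the sieve lookup is_prime[s];
-- tasks.index(m) is total since m ∈ tasks
def selectB (tasks : List Int) (forward : Bool) (elf s : Int) (isp : Bool) : Bool × Int :=
  let m := (PySem.List.min? tasks (fun y => y)).getD 0
  if isp && (PySem.List.count tasks m == 1) then
    (forward, (((PySem.List.index? tasks m).getD 0 : Nat) : Int))
  else if PySem.Int.mod s 28 == 0 then
    (!forward, moveB elf !forward)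
  else
    let nxt := moveB elf forward
    let M := (PySem.List.max? tasks (fun y => y)).getD 0
    if PySem.Int.mod s 2 == 0 && (PySem.List.count tasks M == 1)
        && ((((PySem.List.index? tasks M).getD 0 : Nat) : Int) == nxt) then
      (forward, moveB nxt forward)
    else if PySem.Int.mod s 7 == 0 then
      (forward, 4)
    else
      (forward, nxt)

-- `for s in range(1, n + 1)` runs n.toNat times, s counting up from 1; is_prime[s] is in range
-- for every reached s (1 ≤ s ≤ n < len(is_prime)), so the lookup is the total pyGetD
def loopB : Nat → List Bool → List Int → Bool → Int → Int → List Int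
  | 0, _, tasks, _, _, _ => tasks
  | fuel + 1, flags, tasks, forward, elf, s =>
    let fe := selectB tasks forward elf s (PySem.List.pyGetD flags s false)
    loopB fuel flags (PySem.List.pySetD tasks fe.2 (PySem.List.pyGetD tasks fe.2 0 + 1)) fe.1 fe.2 (s + 1)

def dowork_alt (iterations : Int) : Int :=
  let tasks := loopB iterations.toNat (sieveB iterations) [0, 0, 0, 0, 0] true (-1) 1
  (PySem.List.max? tasks (fun y => y)).getD 0 - (PySem.List.min? tasks (fun y => y)).getD 0

-- ===== PRECONDITION & SPEC =====
def Spec_dowork (iterations : Int) (out : Int) : Prop := out = dowork_alt iterations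
instance (iterations : Int) (out : Int) : Decidable (Spec_dowork iterations out) := by unfold Spec_dowork; infer_instance

-- ===== CLAIM (what is proved, stated in full; the proofs are below) =====
def Claim_equal_dowork : Prop := ∀ (iterations : Int), Dom_dowork iterations → Spec_dowork iterations (dowork iterations)

-- ===== LEMMAS AND PROOFS =====

theorem sqrtI_facts (n : Int) (hn : 0 ≤ n) :
    0 ≤ sqrtI n ∧ sqrtI n * sqrtI n ≤ n ∧ n < (sqrtI n + 1) * (sqrtI n + 1) := by
  unfold sqrtI
  refine ⟨by positivity, ?_, ?_⟩
  · have h := Nat.sqrt_le' n.toNat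
    have h' : ((Nat.sqrt n.toNat ^ 2 : Nat) : Int) ≤ ((n.toNat : Nat) : Int) := by exact_mod_cast h
    rw [Int.toNat_of_nonneg hn] at h'
    push_cast at h'
    nlinarith [h']
  · have h := Nat.lt_succ_sqrt' n.toNat
    have h' : ((n.toNat : Nat) : Int) < ((Nat.sqrt n.toNat).succ ^ 2 : Nat) := by exact_mod_cast h
    rw [Int.toNat_of_nonneg hn] at h'
    push_cast at h'
    nlinarith [h']

-- A's trial division characterised: checkprime(n) tests exactly "2 ≤ n and no divisor d with d² ≤ n"
theorem checkprimeA_iff (n : Int) :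
    checkprimeA n = true ↔ (2 ≤ n ∧ ∀ d : Int, 2 ≤ d → d * d ≤ n → ¬ d ∣ n) := by
  unfold checkprimeA
  by_cases h1 : n ≤ 1
  · rw [if_pos h1]
    exact ⟨fun h => absurd h (by simp), fun h => by omega⟩
  rw [if_neg h1]
  by_cases h2 : n ≤ 3
  · rw [if_pos h2]
    exact ⟨fun _ => ⟨by omega, fun d hd hdd _ => by nlinarith⟩, fun _ => rfl⟩
  rw [if_neg h2]
  obtain ⟨hR0, hRl, hRu⟩ := sqrtI_facts n (by omega)
  by_cases h23 : (2 : Int) ∣ n ∨ (3 : Int) ∣ n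
  · rw [if_pos (by rcases h23 with h | h <;> simp [PySem.Int.mod_eq_zero_iff_dvd, h])]
    refine ⟨fun h => absurd h (by simp), ?_⟩
    rintro ⟨-, hno⟩
    rcases h23 with h | h
    · exact absurd h (hno 2 (by omega) (by omega))
    · by_cases he : (2:Int) ∣ n
      · exact absurd he (hno 2 (by omega) (by omega))
      · have hn9 : 9 ≤ n := by omega
        exact absurd h (hno 3 (by omega) (by omega))
  rw [not_or] at h23
  obtain ⟨hd2, hd3⟩ := h23
  rw [if_neg (by simp [PySem.Int.mod_eq_zero_iff_dvd, hd2, hd3])]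
  have hiff : (!((PySem.List.pyRange 5 (sqrtI n + 1) 6).any
      (fun i => PySem.Int.mod n i == 0 || PySem.Int.mod n (i + 2) == 0))) = true
      ↔ ∀ i ∈ PySem.List.pyRange 5 (sqrtI n + 1) 6, ¬ i ∣ n ∧ ¬ (i + 2) ∣ n := by
    simp [PySem.Int.mod_eq_zero_iff_dvd]
  rw [hiff]
  constructor
  · intro hall
    refine ⟨by omega, fun d hd hdd hdvd => ?_⟩
    have hdodd : ¬ (2 : Int) ∣ d := fun h => hd2 (h.trans hdvd)
    have hd3' : ¬ (3 : Int) ∣ d := fun h => hd3 (h.trans hdvd)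
    have hd5 : 5 ≤ d := by omega
    have hdR : d < sqrtI n + 1 := by nlinarith
    have h6 : d % 6 = 1 ∨ d % 6 = 5 := by omega
    rcases h6 with h6 | h6
    · have hmem : d - 2 ∈ PySem.List.pyRange 5 (sqrtI n + 1) 6 := by
        rw [PySem.List.mem_pyRange_iff_of_pos (by norm_num)]
        exact ⟨by omega, by omega, by omega⟩
      have := (hall _ hmem).2
      rw [(by ring : d - 2 + 2 = d)] at this
      exact this hdvd
    · have hmem : d ∈ PySem.List.pyRange 5 (sqrtI n + 1) 6 := by
        rw [PySem.List.mem_pyRange_iff_of_pos (by norm_num)]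
        exact ⟨by omega, by omega, by omega⟩
      exact (hall _ hmem).1 hdvd
  · rintro ⟨-, hno⟩ i hi
    rw [PySem.List.mem_pyRange_iff_of_pos (by norm_num)] at hi
    obtain ⟨hi5, hiR, hi6⟩ := hi
    refine ⟨hno i (by omega) (by nlinarith), ?_⟩
    intro hdvd
    by_cases hle : (i + 2) * (i + 2) ≤ n
    · exact hno (i + 2) (by omega) hle hdvd
    · obtain ⟨q, hq⟩ := hdvd
      have hq0 : 0 < q := by nlinarith
      have hq2 : 2 ≤ q := by
        by_contra hc
        have hq1 : q = 1 := by omega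
        rw [hq1, mul_one] at hq
        nlinarith
      have hqR : q * q ≤ n := by nlinarith
      exact hno q hq2 hqR ⟨i + 2, by rw [hq]; ring⟩

-- ---------- sieve correctness ----------

-- indexing through pySetD with Int indices
theorem pyGetD_pySetD_int {α : Type} (xs : List α) (q k : Int) (v d : α)
    (hq0 : 0 ≤ q) (hq : q < (xs.length : Int)) (hk0 : 0 ≤ k) :
    PySem.List.pyGetD (PySem.List.pySetD xs q v) k d = if k = q then v else PySem.List.pyGetD xs k d := by
  have hq' : q = ((q.toNat : Nat) : Int) := by omega
  have hk' : k = ((k.toNat : Nat) : Int) := by omega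
  rw [hq', hk', PySem.List.pyGetD_pySetD_natCast xs q.toNat k.toNat v d (by omega)]
  by_cases h : k.toNat = q.toNat
  · rw [if_pos h, if_pos (by exact_mod_cast h)]
  · rw [if_neg h, if_neg (fun hh => h (by exact_mod_cast hh))]
  
-- setting a batch of in-range indices to false
theorem foldl_setFalse (idxs : List Int) : ∀ (flags : List Bool),
    (∀ q ∈ idxs, 0 ≤ q ∧ q < (flags.length : Int)) →
    (idxs.foldl (fun fl q => PySem.List.pySetD fl q false) flags).length = flags.length ∧
    ∀ k : Int, 0 ≤ k →
      PySem.List.pyGetD (idxs.foldl (fun fl q => PySem.List.pySetD fl q false) flags) k false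
        = if k ∈ idxs then false else PySem.List.pyGetD flags k false := by
  induction idxs with
  | nil => intro flags _; exact ⟨rfl, fun k _ => by simp⟩
  | cons q rest ih =>
    intro flags hb
    have hq := hb q (List.mem_cons_self ..)
    have hb' : ∀ r ∈ rest, 0 ≤ r ∧ r < ((PySem.List.pySetD flags q false).length : Int) := by
      intro r hr
      rw [PySem.List.length_pySetD]
      exact hb r (List.mem_cons_of_mem _ hr)
    obtain ⟨ihlen, ihget⟩ := ih (PySem.List.pySetD flags q false) hb'
    rw [List.foldl_cons]
    refine ⟨by rw [ihlen, PySem.List.length_pySetD], fun k hk => ?_⟩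
    rw [ihget k hk, pyGetD_pySetD_int flags q k false false hq.1 hq.2 hk]
    by_cases hkr : k ∈ rest
    · simp [hkr]
    · by_cases hkq : k = q <;> simp [hkr, hkq]

-- membership in the marking range
theorem mem_markRange (n p q : Int) (hp : 0 < p) :
    q ∈ PySem.List.pyRange (p * p) (n + 1) p ↔ (p * p ≤ q ∧ q ≤ n ∧ p ∣ q) := by
  rw [PySem.List.mem_pyRange_iff_of_pos hp]
  have hpp : p ∣ p * p := dvd_mul_left p p
  constructor
  · rintro ⟨h1, h2, h3⟩
    refine ⟨h1, by omega, ?_⟩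
    have := dvd_add h3 hpp
    simpa using this
  · rintro ⟨h1, h2, h3⟩
    exact ⟨h1, by omega, dvd_sub h3 hpp⟩

-- "k has been crossed out by some prime ≤ P"
def Marked (P k : Int) : Prop :=
  ∃ p : Int, 2 ≤ p ∧ p ≤ P ∧ Nat.Prime p.toNat ∧ p ∣ k ∧ p * p ≤ k

-- a number ≥ 2 with no crossing prime below itself is prime (least-divisor argument)
theorem not_marked_self_iff (p : Int) (hp : 2 ≤ p) :
    ¬ Marked (p - 1) p ↔ Nat.Prime p.toNat := by
  have hpcast : p = ((p.toNat : Nat) : Int) := by omega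
  constructor
  · intro hnm
    by_contra hnp
    -- composite: its least prime factor crosses it out
    have hne1 : p.toNat ≠ 1 := by omega
    obtain ⟨m, hprime, hm2, hdvd, hmin⟩ :
        ∃ m, Nat.Prime m ∧ 2 ≤ m ∧ m ∣ p.toNat ∧ (∀ x, 2 ≤ x → x ∣ p.toNat → m ≤ x) :=
      ⟨p.toNat.minFac, Nat.minFac_prime hne1, (Nat.minFac_prime hne1).two_le,
        Nat.minFac_dvd _, fun x h1 h2 => Nat.minFac_le_of_dvd h1 h2⟩
    obtain ⟨c, hc⟩ := hdvd
    have hc1 : c ≠ 1 := fun h =>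
      hnp (by rw [(by rw [h, Nat.mul_one] at hc; exact hc : p.toNat = m)]; exact hprime)
    have hc0 : c ≠ 0 := by intro h; rw [h, Nat.mul_zero] at hc; omega
    have hcm : m ≤ c := hmin c (by omega) ⟨m, by rw [hc]; ring⟩
    have hmm : m * m ≤ p.toNat := by
      calc m * m ≤ m * c := Nat.mul_le_mul_left _ hcm
        _ = p.toNat := hc.symm
    have hlt : m < p.toNat := by nlinarith
    refine hnm ⟨((m : Nat) : Int), by exact_mod_cast hm2, by omega, by simpa using hprime, ?_, ?_⟩
    · exact ⟨((c : Nat) : Int), by rw [hpcast, hc]; push_cast; ring⟩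
    · have hmm' : ((m * m : Nat) : Int) ≤ ((p.toNat : Nat) : Int) := by exact_mod_cast hmm
      push_cast at hmm'; omega
  · rintro hprime ⟨q, hq2, hqlt, hqp, hqdvd, hqq⟩
    have hq0 : (0:Int) ≤ q := by omega
    have hdN : q.toNat ∣ p.toNat := by
      have h' : ((q.toNat : Nat) : Int) ∣ ((p.toNat : Nat) : Int) := by
        rw [Int.toNat_of_nonneg hq0, ← hpcast]
        exact hqdvd
      exact_mod_cast h'
    rcases (Nat.Prime.eq_one_or_self_of_dvd hprime q.toNat hdN) with h | h
    · omega
    · omega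

-- every small divisor yields a crossing prime ≤ sqrt n (via the least prime factor)
theorem marked_iff_small_divisor (n k : Int) (hk : 2 ≤ k) (hkn : k ≤ n) :
    Marked (sqrtI n) k ↔ ∃ d : Int, 2 ≤ d ∧ d * d ≤ k ∧ d ∣ k := by
  obtain ⟨hR0, hRl, hRu⟩ := sqrtI_facts n (by omega)
  constructor
  · rintro ⟨p, hp2, hpR, -, hpdvd, hpp⟩
    exact ⟨p, hp2, hpp, hpdvd⟩
  · rintro ⟨d, hd2, hdd, hdvd⟩
    have hne1 : k.toNat ≠ 1 := by omega
    obtain ⟨m, hprime, hm2, hmdvdN, hmin⟩ :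
        ∃ m, Nat.Prime m ∧ 2 ≤ m ∧ m ∣ k.toNat ∧ (∀ x, 2 ≤ x → x ∣ k.toNat → m ≤ x) :=
      ⟨k.toNat.minFac, Nat.minFac_prime hne1, (Nat.minFac_prime hne1).two_le,
        Nat.minFac_dvd _, fun x h1 h2 => Nat.minFac_le_of_dvd h1 h2⟩
    have hdN : d.toNat ∣ k.toNat := by
      have h' : ((d.toNat : Nat) : Int) ∣ ((k.toNat : Nat) : Int) := by
        rw [Int.toNat_of_nonneg (by omega : (0:Int) ≤ d), Int.toNat_of_nonneg (by omega : (0:Int) ≤ k)]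
        exact hdvd
      exact_mod_cast h'
    have hmd : m ≤ d.toNat := hmin _ (by omega) hdN
    have hmdvd : (m : Int) ∣ k := by
      obtain ⟨c, hc⟩ := hmdvdN
      exact ⟨(c : Int), by rw [(by omega : k = ((k.toNat : Nat) : Int)), hc]; push_cast; ring⟩
    have hmI : (m : Int) ≤ d := by omega
    have hmm : (m : Int) * (m : Int) ≤ k := by nlinarith
    have hmR : (m : Int) ≤ sqrtI n := by nlinarith
    exact ⟨(m : Int), by exact_mod_cast hm2, hmR, by simpa using hprime, hmdvd, hmm⟩

-- the sieve invariant after processing all primes < P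
def SieveInv (n P : Int) (flags : List Bool) : Prop :=
  flags.length = (n + 1).toNat ∧
  ∀ k : Int, 0 ≤ k → k ≤ n →
    (PySem.List.pyGetD flags k false = true ↔ (2 ≤ k ∧ ¬ Marked P k))

theorem sieve_body_step (n p : Int) (hn : 2 ≤ n) (hp2 : 2 ≤ p) (hpR : p ≤ sqrtI n)
    (flags : List Bool) (hinv : SieveInv n (p - 1) flags) :
    SieveInv n p
      (if PySem.List.pyGetD flags p false then
        (PySem.List.pyRange (p * p) (n + 1) p).foldl
          (fun fl q => PySem.List.pySetD fl q false) flags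
      else flags) := by
  obtain ⟨hlen, hget⟩ := hinv
  obtain ⟨hR0, hRl, hRu⟩ := sqrtI_facts n (by omega)
  have hpn : p ≤ n := by nlinarith
  have hlenI : (flags.length : Int) = n + 1 := by rw [hlen]; omega
  have hmarked_step : ∀ k : Int, (¬ (Nat.Prime p.toNat ∧ p ∣ k ∧ p * p ≤ k)) →
      (Marked p k ↔ Marked (p - 1) k) := by
    intro k hnk
    constructor
    · rintro ⟨q, hq2, hqP, hqp, hqdvd, hqq⟩
      by_cases hqeq : q = p
      · exact absurd ⟨by rwa [hqeq] at hqp, by rwa [hqeq] at hqdvd, by rwa [hqeq] at hqq⟩ hnk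
      · exact ⟨q, hq2, by omega, hqp, hqdvd, hqq⟩
    · rintro ⟨q, hq2, hqP, hqp, hqdvd, hqq⟩
      exact ⟨q, hq2, by omega, hqp, hqdvd, hqq⟩
  have hlookup := hget p (by omega) hpn
  by_cases hfp : PySem.List.pyGetD flags p false = true
  · -- flags[p] is true: p is prime; mark its multiples from p² up
    have hprime : Nat.Prime p.toNat := by
      have := (hlookup.mp hfp).2
      exact (not_marked_self_iff p hp2).mp this
    rw [if_pos hfp]
    have hb : ∀ q ∈ PySem.List.pyRange (p * p) (n + 1) p, 0 ≤ q ∧ q < (flags.length : Int) := by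
      intro q hq
      rw [mem_markRange n p q (by omega)] at hq
      constructor
      · nlinarith [hq.1]
      · omega
    obtain ⟨hlen', hget'⟩ := foldl_setFalse (PySem.List.pyRange (p * p) (n + 1) p) flags hb
    refine ⟨by rw [hlen', hlen], fun k hk0 hkn => ?_⟩
    rw [hget' k hk0]
    by_cases hmem : k ∈ PySem.List.pyRange (p * p) (n + 1) p
    · rw [if_pos hmem]
      rw [mem_markRange n p k (by omega)] at hmem
      have hMk : Marked p k := ⟨p, hp2, le_refl p, hprime, hmem.2.2, hmem.1⟩
      simp [hMk]
    · rw [if_neg hmem, hget k hk0 hkn]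
      rw [mem_markRange n p k (by omega)] at hmem
      have : ¬ (Nat.Prime p.toNat ∧ p ∣ k ∧ p * p ≤ k) := by tauto
      rw [hmarked_step k this]
  · -- flags[p] is false: p is composite, nothing marked in this round
    have hnprime : ¬ Nat.Prime p.toNat := by
      intro hpr
      exact hfp (hlookup.mpr ⟨hp2, (not_marked_self_iff p hp2).mpr hpr⟩)
    rw [if_neg hfp]
    refine ⟨hlen, fun k hk0 hkn => ?_⟩
    rw [hget k hk0 hkn, hmarked_step k (by tauto)]

theorem sieve_outer (n : Int) (hn : 2 ≤ n) : ∀ (m : Nat) (P : Int) (flags : List Bool),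
    2 ≤ P → P + (m : Int) = sqrtI n + 1 → SieveInv n (P - 1) flags →
    SieveInv n (sqrtI n)
      ((PySem.List.pyRange P (sqrtI n + 1) 1).foldl
        (fun flags p =>
          if PySem.List.pyGetD flags p false then
            (PySem.List.pyRange (p * p) (n + 1) p).foldl
              (fun fl q => PySem.List.pySetD fl q false) flags
          else flags) flags) := by
  intro m
  induction m with
  | zero =>
    intro P flags hP2 hPm hinv
    rw [PySem.List.pyRange_one_eq_nil (by omega)]
    have : P - 1 = sqrtI n := by omega
    rwa [this] at hinv
  | succ m ih =>
    intro P flags hP2 hPm hinv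
    rw [PySem.List.pyRange_one_cons (by omega), List.foldl_cons]
    exact ih (P + 1) _ (by omega) (by omega)
      (by simpa using sieve_body_step n P hn hP2 (by omega) flags hinv)

theorem sieve_init (n : Int) (hn : 2 ≤ n) :
    SieveInv n 1 (false :: false :: List.replicate (n - 1).toNat true) := by
  constructor
  · simp; omega
  · intro k hk0 hkn
    have hnm : ¬ Marked 1 k := by rintro ⟨p, hp2, hp1, -⟩; omega
    have hk' : k = ((k.toNat : Nat) : Int) := by omega
    by_cases hk2 : 2 ≤ k
    · have hval : PySem.List.pyGetD (false :: false :: List.replicate (n - 1).toNat true) k false = true := by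
        have hkt : k.toNat = (k.toNat - 2) + 1 + 1 := by omega
        rw [hk', PySem.List.pyGetD_natCast, hkt, List.getD_cons_succ, List.getD_cons_succ,
          List.getD_eq_getElem?_getD, List.getElem?_replicate, if_pos (by omega)]
        rfl
      rw [hval]
      exact iff_of_true rfl ⟨hk2, hnm⟩
    · have hval : PySem.List.pyGetD (false :: false :: List.replicate (n - 1).toNat true) k false = false := by
        have hcase : k.toNat = 0 ∨ k.toNat = 1 := by omega
        rw [hk', PySem.List.pyGetD_natCast]
        rcases hcase with h | h <;> rw [h] <;> rfl
      rw [hval]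
      exact iff_of_false (by simp) (fun hh => by omega)

-- the sieve table agrees with A's trial division on every reached index
theorem sieve_lookup (n s : Int) (h1 : 1 ≤ s) (h2 : s ≤ n) :
    PySem.List.pyGetD (sieveB n) s false = checkprimeA s := by
  by_cases hn : n < 2
  · -- only s = n = 1 is possible; both sides are false
    have hs : s = 1 := by omega
    have hn1 : n = 1 := by omega
    subst hs; subst hn1
    decide
  · rw [not_lt] at hn
    unfold sieveB
    rw [if_neg (by omega)]
    have hinv := sieve_outer n hn (sqrtI n - 1).toNat 2
      (false :: false :: List.replicate (n - 1).toNat true) (by omega)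
      (by
        obtain ⟨hR0, hRl, hRu⟩ := sqrtI_facts n (by omega)
        have : 1 ≤ sqrtI n := by nlinarith
        omega)
      (by simpa using sieve_init n hn)
    obtain ⟨-, hget⟩ := hinv
    have hlook := hget s (by omega) h2
    rw [Bool.eq_iff_iff, hlook, checkprimeA_iff s]
    by_cases hs2 : 2 ≤ s
    · rw [marked_iff_small_divisor n s hs2 h2]
      constructor
      · rintro ⟨-, hno⟩
        refine ⟨hs2, fun d hd hdd hdvd => hno ⟨d, hd, hdd, hdvd⟩⟩
      · rintro ⟨-, hno⟩
        refine ⟨hs2, ?_⟩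
        rintro ⟨d, hd, hdd, hdvd⟩
        exact hno d hd hdd hdvd
    · constructor
      · rintro ⟨h, -⟩; omega
      · rintro ⟨h, -⟩; omega

-- ---------- the extremum helpers ----------

-- the enumerate-filter scan: length = count
theorem filter_enum_len (v : Int) (l : List Int) : ∀ (s : Int),
    ((PySem.List.enumerate l s).filter (fun q => q.2 == v)).length = l.count v := by
  induction l with
  | nil => intro s; simp [PySem.List.enumerate]
  | cons x t ih =>
    intro s
    rw [PySem.List.enumerate_cons, List.filter_cons, List.count_cons]
    by_cases hx : x = v
    · simp [hx, ih]
    · simp [hx, ih]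

theorem filter_enum_unique (v : Int) (l : List Int) : ∀ (s : Int), l.count v = 1 →
    (PySem.List.enumerate l s).filter (fun q => q.2 == v) = [(s + (l.idxOf v : Int), v)] := by
  induction l with
  | nil => intro s h; simp at h
  | cons x t ih =>
    intro s h
    rw [PySem.List.enumerate_cons, List.filter_cons]
    by_cases hx : x = v
    · subst hx
      have ht : t.count x = 0 := by
        rw [List.count_cons] at h; simp at h; omega
      have h0 : ((PySem.List.enumerate t (s+1)).filter (fun q => q.2 == x)).length = 0 := by
        rw [filter_enum_len]; exact ht
      rw [List.length_eq_zero_iff] at h0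
      simp [h0]
    · have h' : t.count v = 1 := by
        rw [List.count_cons] at h
        simp [hx] at h; omega
      rw [if_neg (by simp [hx]), ih (s+1) h', List.idxOf_cons]
      have hb : (x == v) = false := by simp [hx]
      simp [hb]
      omega

-- A's findmin/findmax scan, over an arbitrary target value (equal to the port by rfl)
def coreScan (l : List Int) (v : Int) : Int :=
  let result : List Int := (PySem.List.enumerate l).foldl
    (fun acc q => if q.2 == v then acc ++ [q.1] else acc) []
  if 1 < result.length then -1 else (PySem.List.pyGet? result 0).getD 0

theorem scan_eq (l : List Int) (v : Int) :
    (PySem.List.enumerate l).foldl (fun acc q => if q.2 == v then acc ++ [q.1] else acc) ([] : List Int)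
    = ((PySem.List.enumerate l).filter (fun q => q.2 == v)).map (fun q => q.1) :=
  (PySem.List.foldl_append_if (fun (q : Int × Int) => q.2 == v) (fun q => q.1)
    (PySem.List.enumerate l) []).trans (List.nil_append _)

theorem coreScan_spec (l : List Int) (v : Int) (hmem : v ∈ l) :
    coreScan l v = (if l.count v = 1 then ((l.idxOf v : Nat) : Int) else -1) := by
  have hcnt : 0 < l.count v := List.count_pos_iff.mpr hmem
  unfold coreScan
  rw [scan_eq l v]
  by_cases h1 : l.count v = 1
  · rw [filter_enum_unique v l 0 h1]
    simp [h1]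
  · have hlen : 1 < (((PySem.List.enumerate l).filter (fun q => q.2 == v)).map (fun q => q.1)).length := by
      rw [List.length_map, filter_enum_len]; omega
    rw [if_pos hlen, if_neg h1]

theorem findmin_spec (l : List Int) (hl : l ≠ []) :
    findminA l = (if l.count ((PySem.List.min? l (fun y => y)).getD 0) = 1
      then ((l.idxOf ((PySem.List.min? l (fun y => y)).getD 0) : Nat) : Int) else -1) := by
  obtain ⟨m, hm⟩ : ∃ m, PySem.List.min? l (fun y => y) = some m := by
    cases h : PySem.List.min? l (fun y => y) with
    | none => exact absurd ((PySem.List.min?_eq_none_iff l _).mp h) hl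
    | some m => exact ⟨m, rfl⟩
  have hmem : m ∈ l := PySem.List.min?_mem hm
  have h0 : findminA l = coreScan l ((PySem.List.min? l (fun y => y)).getD 0) := rfl
  rw [h0, hm, Option.getD_some, coreScan_spec l m hmem]

theorem findmax_spec (l : List Int) (hl : l ≠ []) :
    findmaxA l = (if l.count ((PySem.List.max? l (fun y => y)).getD 0) = 1
      then ((l.idxOf ((PySem.List.max? l (fun y => y)).getD 0) : Nat) : Int) else -1) := by
  obtain ⟨m, hm⟩ : ∃ m, PySem.List.max? l (fun y => y) = some m := by
    cases h : PySem.List.max? l (fun y => y) with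
    | none => exact absurd ((PySem.List.max?_eq_none_iff l _).mp h) hl
    | some m => exact ⟨m, rfl⟩
  have hmem : m ∈ l := PySem.List.max?_mem hm
  have h0 : findmaxA l = coreScan l ((PySem.List.max? l (fun y => y)).getD 0) := rfl
  rw [h0, hm, Option.getD_some, coreScan_spec l m hmem]

theorem idxOf?_eq_some_of_mem (l : List Int) (v : Int) (h : v ∈ l) :
    List.idxOf? v l = some (List.idxOf v l) := by
  induction l with
  | nil => simp at h
  | cons x t ih =>
    by_cases hx : x = v
    · subst hx; simp [List.idxOf?_cons]
    · rcases List.mem_cons.mp h with h' | h'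
      · exact absurd h'.symm hx
      · simp [List.idxOf?_cons, hx, ih h']

-- ---------- the per-step branch ----------

theorem select_eq (tasks : List Int) (hl : tasks ≠ []) (dir : Bool) (elf s : Int)
    (isp : Bool) (hp : isp = checkprimeA s) :
    selectA tasks dir elf s = selectB tasks dir elf s isp := by
  obtain ⟨m, hm⟩ : ∃ m, PySem.List.min? tasks (fun y => y) = some m := by
    cases h : PySem.List.min? tasks (fun y => y) with
    | none => exact absurd ((PySem.List.min?_eq_none_iff tasks _).mp h) hl
    | some m => exact ⟨m, rfl⟩
  obtain ⟨M, hM⟩ : ∃ M, PySem.List.max? tasks (fun y => y) = some M := by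
    cases h : PySem.List.max? tasks (fun y => y) with
    | none => exact absurd ((PySem.List.max?_eq_none_iff tasks _).mp h) hl
    | some M => exact ⟨M, rfl⟩
  have hmmem : m ∈ tasks := PySem.List.min?_mem hm
  have hMmem : M ∈ tasks := PySem.List.max?_mem hM
  have hidxm : (PySem.List.index? tasks m).getD 0 = tasks.idxOf m := by
    rw [PySem.List.index?_eq_idxOf?, idxOf?_eq_some_of_mem _ _ hmmem]; rfl
  have hidxM : (PySem.List.index? tasks M).getD 0 = tasks.idxOf M := by
    rw [PySem.List.index?_eq_idxOf?, idxOf?_eq_some_of_mem _ _ hMmem]; rfl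
  have hnxt0 : 0 ≤ moveB elf dir := by
    unfold moveB; split <;> exact PySem.Int.mod_nonneg _ (by norm_num)
  have hmove : moveelfA = moveB := rfl
  subst hp
  unfold selectA selectB ismaxA
  simp only [hmove, findmin_spec tasks hl, findmax_spec tasks hl, hm, hM,
    Option.getD_some, PySem.List.count_eq, hidxm, hidxM]
  by_cases hc1 : List.count m tasks = 1
  · by_cases hcM : List.count M tasks = 1
    · simp [hc1, hcM]
    · have hne : ¬(-1 = moveB elf dir) := by omega
      simp [hc1, hcM, hne]
  · by_cases hcM : List.count M tasks = 1
    · simp [hc1, hcM]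
    · have hne : ¬(-1 = moveB elf dir) := by omega
      simp [hc1, hcM, hne]

theorem loop_eq (n : Int) : ∀ (fuel : Nat) (tasks : List Int), tasks ≠ [] →
    ∀ (dir : Bool) (elf step : Int), step + (fuel : Int) = n → 0 ≤ step →
    loopA fuel tasks dir elf step = loopB fuel (sieveB n) tasks dir elf (step + 1) := by
  intro fuel
  induction fuel with
  | zero => intro tasks _ dir elf step _ _; rfl
  | succ k ih =>
    intro tasks hl dir elf step hstep hstep0
    have hl' : ∀ (i v : Int), PySem.List.pySetD tasks i v ≠ [] := by
      intro i v
      apply List.ne_nil_of_length_pos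
      rw [PySem.List.length_pySetD]
      exact List.length_pos_of_ne_nil hl
    have hlook : PySem.List.pyGetD (sieveB n) (step + 1) false = checkprimeA (step + 1) := by
      apply sieve_lookup n (step + 1) (by omega) (by push_cast at hstep; omega)
    have hsel : selectB tasks dir elf (step + 1) (PySem.List.pyGetD (sieveB n) (step + 1) false)
        = selectA tasks dir elf (step + 1) :=
      (select_eq tasks hl dir elf (step + 1) _ hlook).symm
    simp only [loopA, loopB, hsel]
    exact ih _ (hl' _ _) _ _ _ (by push_cast at hstep ⊢; omega) (by omega)

-- ===== VERDICT (by name: the statement is the Claim_ definition above) =====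
theorem dowork_spec : Claim_equal_dowork := by
  intro iterations _
  unfold Spec_dowork dowork dowork_alt
  by_cases h : 0 < iterations
  · rw [loop_eq iterations iterations.toNat [0, 0, 0, 0, 0] (by simp) true (-1) 0
      (by rw [Int.toNat_of_nonneg (by omega)]; omega) (by omega)]
    norm_num
  · have h0 : iterations.toNat = 0 := by omega
    rw [h0]
    rfl
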